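-- pv_equiv track=rewrite | github.com/alibaba/TorchEasyRec | tzrec/tools/tdm/gen_tree/tree_builder.py | _column_modes
-- ===== SOURCE A (Python) =====
-- from collections import Counter
-- from typing import List, Optional
--
-- def _column_modes(matrix: List[List[str]]) -> List[str]:
--     transposed_matrix = list(zip(*matrix))
--     modes = []
--
--     for column in transposed_matrix:
--         filtered_column = [x for x in column if x]
--         if filtered_column:
--             most_common = Counter(filtered_column).most_common(1)[0][0]
--             modes.append(most_common)
--         else:
--             modes.append("")
--
--     return modes
-- ===== SOURCE B (Python) =====
-- def _mode(xs):
--     # Recursive peeling: best (value, count) of xs, ties to the earliest value.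
--     if not xs:
--         return ("", 0)
--     v = xs[0]
--     c = xs.count(v)
--     w, d = _mode([y for y in xs if y != v])
--     return (v, c) if c >= d else (w, d)
--
--
-- def _column_modes(matrix):
--     n = min((len(r) for r in matrix), default=0)
--     return [_mode([row[j] for row in matrix if row[j]])[0] for j in range(n)]
-- ===== Notes on version B (the rewrite author's own statement) =====
-- stated objective: alternative
-- what changed: Replaces A's transpose-then-Counter hash counting with a recursive peeling mode: take the column's first non-empty value, count it with list.count, strip all its occurrences, recurse on the remainder and keep the better (count, earliest-first-occurrence) candidate; no dict/Counter is built.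
import Mathlib
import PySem

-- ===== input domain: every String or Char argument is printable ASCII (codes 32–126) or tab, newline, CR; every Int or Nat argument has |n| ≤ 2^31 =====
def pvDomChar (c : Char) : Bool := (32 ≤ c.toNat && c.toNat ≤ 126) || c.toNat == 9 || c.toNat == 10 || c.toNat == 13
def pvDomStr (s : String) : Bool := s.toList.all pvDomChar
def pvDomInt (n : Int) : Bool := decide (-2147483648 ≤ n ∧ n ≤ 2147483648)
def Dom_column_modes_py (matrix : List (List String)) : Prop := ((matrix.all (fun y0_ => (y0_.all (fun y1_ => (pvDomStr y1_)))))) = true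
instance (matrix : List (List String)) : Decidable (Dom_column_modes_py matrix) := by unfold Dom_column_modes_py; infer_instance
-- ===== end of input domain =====

-- B replaces A's transpose-then-Counter hash counting with a recursive peeling mode
-- (count the first value, strip it, recurse); objective: alternative algorithm.

-- ===== PORT A =====
-- zip(*matrix) for a list of lists: the j-th column for j below the shortest row length
-- (exact: zip truncates to the shortest row; min? = none on an empty matrix gives []).
-- r.getD j "" is exact here since every j produced is < every row's length.
-- most_common(1)[0][0] = first key of maximal count in insertion order of the Counter
-- (CPython: most_common(1) = nlargest by count, stable, first maximum wins), i.e.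
-- PySem.List.max? (first extremal) on (counter …).items; the branch guarantees `some`.
def column_modes_py (matrix : List (List String)) : List String :=
  let n := ((matrix.map (fun r => r.length)).min?).getD 0
  let transposed := (List.range n).map (fun j => matrix.map (fun r => r.getD j ""))
  transposed.map (fun column =>
    let filtered := column.filter (fun x => x ≠ "")
    if filtered ≠ [] then
      ((PySem.List.max? (PySem.Dict.counter filtered).items (fun kv => kv.2)).map (fun kv => kv.1)).getD ""
    else "")

-- ===== PORT B =====
-- _mode(xs): v = xs[0]; c = xs.count(v); recurse on [y for y in xs if y != v];
-- keep (v, c) if c >= d.  Structural recursion on the filtered (shorter) list.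
def pvMode : List String → String × Int
  | [] => ("", 0)
  | x :: t =>
      let c : Int := (PySem.List.count (x :: t) x : Int)
      let rest := (x :: t).filter (fun y => y ≠ x)
      let wd := pvMode rest
      if c ≥ wd.2 then (x, c) else wd
  termination_by xs => xs.length
  decreasing_by
    simp only [List.filter]
    have h := List.length_filter_le (fun y => decide (y ≠ x)) t
    simp at h ⊢
    omega

-- n = min((len(r) for r in matrix), default=0);
-- [_mode([row[j] for row in matrix if row[j]])[0] for j in range(n)];
-- row[j] is in range for every j < n, so r.getD j "" is exact.
def column_modes_py_alt (matrix : List (List String)) : List String :=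
  let n := ((matrix.map (fun r => r.length)).min?).getD 0
  (List.range n).map (fun j =>
    (pvMode ((matrix.filter (fun r => r.getD j "" ≠ "")).map (fun r => r.getD j ""))).1)

-- ===== PRECONDITION & SPEC =====
def Spec_column_modes_py (matrix : List (List String)) (out : List String) : Prop := out = column_modes_py_alt matrix
instance (matrix : List (List String)) (out : List String) : Decidable (Spec_column_modes_py matrix out) := by unfold Spec_column_modes_py; infer_instance

-- ===== CLAIM (what is proved, stated in full; the proofs are below) =====
def Claim_equal_column_modes_py : Prop := ∀ (matrix : List (List String)), Dom_column_modes_py matrix → Spec_column_modes_py matrix (column_modes_py matrix)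

-- ===== LEMMAS AND PROOFS =====

-- Running first-max (strict improvement) over counts: the loop inside PySem.List.max?.
def pvRM (a : String × Int) (L : List (String × Int)) : String × Int :=
  L.foldl (fun m x => if m.2 < x.2 then x else m) a

theorem pvRM_nil (a : String × Int) : pvRM a [] = a := rfl

theorem pvMode_nil : pvMode [] = ("", 0) := by rw [pvMode]

theorem pvMax?_eq_rm (a : String × Int) (L : List (String × Int)) :
    PySem.List.max? (a :: L) (fun kv => kv.2) = some (pvRM a L) := by
  show L.foldl _ (some a) = _
  induction L generalizing a with
  | nil => rfl
  | cons y L ih =>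
    simp only [List.foldl_cons, pvRM]
    by_cases h : a.2 < y.2 <;> simp [h, ih, pvRM]

-- First-max head absorption: pvRM a (p :: L) picks the better of a and pvRM p L,
-- ties to a (the earlier element).
theorem pvRM_head (L : List (String × Int)) (a p : String × Int) :
    pvRM a (p :: L) = if a.2 < (pvRM p L).2 then pvRM p L else a := by
  induction L generalizing a p with
  | nil =>
    simp only [pvRM, List.foldl_cons, List.foldl_nil]
  | cons z L ih =>
    have hL : pvRM a (p :: z :: L) = pvRM (if a.2 < p.2 then p else a) (z :: L) := rfl
    rw [hL, ih, ih]
    by_cases h1 : a.2 < p.2 <;> by_cases h2 : p.2 < (pvRM z L).2 <;>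
      simp [h1, h2] <;> (intro h3; exact absurd h3 (by omega))

-- set(x :: t) in first-insertion order = x followed by set(t with x removed).
theorem pvFoldlAdd_of_mem {s : PySem.Set String} {x : String} (hx : x ∈ s) (t : List String) :
    t.foldl PySem.Set.add s = (t.filter (fun y => y ≠ x)).foldl PySem.Set.add s := by
  induction t generalizing s with
  | nil => rfl
  | cons y t ih =>
    by_cases hy : y = x
    · subst hy
      have : PySem.Set.add s y = s := by
        simp only [PySem.Set.add, PySem.Set.contains]
        rw [if_pos (by simpa using hx)]
      simp [List.filter, this, ih hx]
    · have hx' : x ∈ PySem.Set.add s y := by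
        simp only [PySem.Set.add]; split <;> simp [hx]
      simp [List.filter, hy, ih hx']

theorem pvFoldlAdd_cons_of_ne {x : String} (t : List String) (h : ∀ y ∈ t, y ≠ x)
    (s : List String) :
    t.foldl PySem.Set.add (x :: s) = x :: t.foldl PySem.Set.add s := by
  induction t generalizing s with
  | nil => rfl
  | cons y t ih =>
    have hy : y ≠ x := h y (by simp)
    have hadd : PySem.Set.add (x :: s) y = x :: PySem.Set.add s y := by
      simp only [PySem.Set.add, PySem.Set.contains, List.contains_cons,
        show (y == x) = false by simpa using hy, Bool.false_or]
      split_ifs <;> rfl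
    rw [List.foldl_cons, hadd, List.foldl_cons,
      ih (fun z hz => h z (by simp [hz])) (PySem.Set.add s y)]

theorem pvOfList_cons (x : String) (t : List String) :
    PySem.Set.ofList (x :: t) = x :: PySem.Set.ofList (t.filter (fun y => y ≠ x)) := by
  show (x :: t).foldl PySem.Set.add PySem.Set.empty = _
  have h0 : (x :: t).foldl PySem.Set.add PySem.Set.empty = t.foldl PySem.Set.add [x] := by
    simp [PySem.Set.empty, PySem.Set.add, PySem.Set.contains]
  rw [h0, pvFoldlAdd_of_mem (by simp : x ∈ ([x] : List String)) t,
    pvFoldlAdd_cons_of_ne _ (fun y hy => by simpa using (List.mem_filter.mp hy).2) []]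
  rfl

-- Counter(x :: t).items = (x, count) :: Counter(t minus x).items.
theorem pvItems_counter_cons (x : String) (t : List String) :
    (PySem.Dict.counter (x :: t)).items
      = (x, ((x :: t).count x : Int)) :: (PySem.Dict.counter (t.filter (fun y => y ≠ x))).items := by
  rw [PySem.Dict.items_counter, PySem.Dict.items_counter, pvOfList_cons, List.map_cons]
  congr 1
  apply List.map_congr_left
  intro k hk
  have hkx : k ≠ x := by
    have := PySem.Set.mem_ofList (t.filter (fun y => y ≠ x)) k |>.mp hk
    simpa using (List.mem_filter.mp this).2
  have h1 : List.count k (t.filter (fun y => y ≠ x)) = List.count k t :=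
    List.count_filter (by simpa using hkx)
  have h2 : List.count k (x :: t) = List.count k t := List.count_cons_of_ne (Ne.symm hkx)
  rw [h1, h2]

-- The heart: A's first-max over Counter items equals B's recursive peeling mode.
theorem pvMode_max (n : Nat) : ∀ (f : List String), f.length ≤ n → f ≠ [] →
    PySem.List.max? (PySem.Dict.counter f).items (fun kv => kv.2) = some (pvMode f) := by
  induction n with
  | zero => intro f hlen hne; cases f with
      | nil => exact absurd rfl hne
      | cons x t => simp at hlen
  | succ n ih =>
    intro f hlen hne
    cases f with
    | nil => exact absurd rfl hne
    | cons x t =>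
      set f' := (x :: t).filter (fun y => y ≠ x) with hf'
      have hf'sub : f' = t.filter (fun y => y ≠ x) := by
        simp [hf', List.filter]
      have hlen' : f'.length ≤ n := by
        rw [hf'sub]
        have := List.length_filter_le (fun y => decide (y ≠ x)) t
        simp only [List.length_cons] at hlen
        omega
      have hcnt : (PySem.List.count (x :: t) x : Int) = ((x :: t).count x : Int) := by
        simp [PySem.List.count]
      have hmode : pvMode (x :: t)
          = (if ((x :: t).count x : Int) ≥ (pvMode f').2
             then (x, ((x :: t).count x : Int)) else pvMode f') := by
        rw [pvMode]; simp only [← hf', hcnt]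
      rw [pvItems_counter_cons, ← hf'sub]
      by_cases hf'ne : f' = []
      · rw [hf'ne]
        have h0 : (PySem.Dict.counter ([] : List String)).items = [] := rfl
        rw [h0, pvMax?_eq_rm, pvRM_nil, hmode, hf'ne, pvMode_nil]
        rw [if_pos (by positivity)]
      · have hIH := ih f' hlen' hf'ne
        cases hL : (PySem.Dict.counter f').items with
        | nil => rw [hL] at hIH; simp [PySem.List.max?] at hIH
        | cons p L =>
          rw [hL] at hIH
          rw [pvMax?_eq_rm, pvRM_head]
          rw [pvMax?_eq_rm] at hIH
          have hpm : pvRM p L = pvMode f' := by injection hIH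
          rw [hpm, hmode]
          by_cases h : (((x :: t).count x : Nat) : Int) < (pvMode f').2
          · rw [if_pos h, if_neg (by omega)]
          · rw [if_neg h, if_pos (by omega)]

-- Per-column bridge: A's body on a column = B's peeling mode of the filtered column.
theorem pvColumn_eq (column : List String) :
    (if column.filter (fun x => x ≠ "") ≠ [] then
       ((PySem.List.max? (PySem.Dict.counter (column.filter (fun x => x ≠ ""))).items
           (fun kv => kv.2)).map (fun kv => kv.1)).getD ""
     else "")
      = (pvMode (column.filter (fun x => x ≠ ""))).1 := by
  set f := column.filter (fun x => x ≠ "") with hf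
  by_cases hne : f = []
  · simp [hne, pvMode_nil]
  · rw [pvMode_max f.length f le_rfl hne]
    simp [hne]

-- ===== VERDICT (by name: the statement is the Claim_ definition above) =====
theorem column_modes_py_spec : Claim_equal_column_modes_py := by
  intro matrix _
  unfold Spec_column_modes_py column_modes_py column_modes_py_alt
  simp only [List.map_map]
  apply List.map_congr_left
  intro j _
  have hcomm : (matrix.filter (fun r => r.getD j "" ≠ "")).map (fun r => r.getD j "")
      = (matrix.map (fun r => r.getD j "")).filter (fun x => x ≠ "") := by
    rw [List.filter_map]; rfl
  rw [hcomm]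
  exact pvColumn_eq (matrix.map (fun r => r.getD j ""))
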